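-- pv_equiv track=rewrite | github.com/veg/DRHIP | drhip/utils/sequence_utils.py | get_unique_aa
-- ===== SOURCE A (Python) =====
-- from typing import Dict, List
-- from collections import Counter
--
-- def get_unique_aa(focal_composition: Counter, other_compositions: List[Counter]) -> str:
--     """Get amino acids unique to the focal clade.
--
--     Args:
--         focal_composition: Counter of amino acid frequencies in the focal clade
--         other_compositions: List of Counters for other clades
--
--     Returns:
--         Space-separated string of unique amino acids or empty string if none
--     """
--     if not focal_composition:
--         return ''
--
--     # Collect all amino acids from other clades
--     other_clade_aas = set()
--     for comp in other_compositions: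
--         other_clade_aas.update(comp.keys())
--
--     # Find amino acids unique to the focal clade
--     unique_aas = set(focal_composition.keys()) - other_clade_aas
--
--     return ' '.join(sorted(unique_aas))
-- ===== SOURCE B (Python) =====
-- from typing import List
-- from collections import Counter
--
-- def get_unique_aa(focal_composition: Counter, other_compositions: List[Counter]) -> str:
--     """Amino acids unique to the focal clade, as a space-separated sorted string."""
--     return ' '.join(sorted(
--         aa for aa in focal_composition
--         if all(aa not in comp for comp in other_compositions)
--     ))
-- ===== Notes on version B (the rewrite author's own statement) =====
-- stated objective: simpler
-- what changed: Drops the empty guard and the build-a-union-set-then-set-difference pass; instead filters the focal keys directly, keeping each amino acid only if it is absent from every other composition, then sorts and joins.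
import Mathlib
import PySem

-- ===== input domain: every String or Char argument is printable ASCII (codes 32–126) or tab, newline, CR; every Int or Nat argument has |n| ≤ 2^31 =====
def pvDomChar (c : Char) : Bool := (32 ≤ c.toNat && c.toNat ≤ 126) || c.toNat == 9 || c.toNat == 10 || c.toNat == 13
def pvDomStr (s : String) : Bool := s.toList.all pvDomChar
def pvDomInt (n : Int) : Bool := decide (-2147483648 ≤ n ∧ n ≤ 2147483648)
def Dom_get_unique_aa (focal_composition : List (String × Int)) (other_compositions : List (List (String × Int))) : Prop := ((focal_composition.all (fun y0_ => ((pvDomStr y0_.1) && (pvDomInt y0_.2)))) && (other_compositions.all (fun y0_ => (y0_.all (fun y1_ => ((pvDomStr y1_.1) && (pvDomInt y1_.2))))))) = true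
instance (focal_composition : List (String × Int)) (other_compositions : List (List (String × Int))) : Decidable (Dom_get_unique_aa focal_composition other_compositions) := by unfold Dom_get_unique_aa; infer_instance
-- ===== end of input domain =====

-- B drops the union-set construction and set difference and instead keeps each focal key
-- absent from every other composition (simpler, one comprehension). Equivalent on all inputs.

-- ===== PORT A =====
-- A: if not focal: ''; build the union set of all other clades' keys; set difference; sort; join.
def get_unique_aa (focal_composition : List (String × Int)) (other_compositions : List (List (String × Int))) : String :=
  if focal_composition = [] then ""
  else
    let other_clade_aas : PySem.Set String :=
      other_compositions.foldl (fun s comp => PySem.Set.update s (comp.map Prod.fst)) PySem.Set.empty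
    let unique_aas : PySem.Set String :=
      PySem.Set.diff (PySem.Set.ofList (focal_composition.map Prod.fst)) other_clade_aas
    PySem.Str.join " " (PySem.List.sorted unique_aas (fun x => x) false)

-- ===== PORT B =====
-- B: sorted(aa for aa in focal if all(aa not in comp for comp in others)), joined by ' '.
-- Iterating the Counter yields its distinct keys (first occurrences): PySem.List.dedup of the key list.
def get_unique_aa_alt (focal_composition : List (String × Int)) (other_compositions : List (List (String × Int))) : String :=
  PySem.Str.join " "
    (PySem.List.sorted
      ((PySem.List.dedup (focal_composition.map Prod.fst)).filter
        (fun aa => other_compositions.all (fun comp => !(comp.map Prod.fst).contains aa)))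
      (fun x => x) false)

-- ===== PRECONDITION & SPEC =====
def Spec_get_unique_aa (focal_composition : List (String × Int)) (other_compositions : List (List (String × Int))) (out : String) : Prop := out = get_unique_aa_alt focal_composition other_compositions
instance (focal_composition : List (String × Int)) (other_compositions : List (List (String × Int))) (out : String) : Decidable (Spec_get_unique_aa focal_composition other_compositions out) := by unfold Spec_get_unique_aa; infer_instance

-- ===== CLAIM (what is proved, stated in full; the proofs are below) =====
def Claim_equal_get_unique_aa : Prop := ∀ (focal_composition : List (String × Int)) (other_compositions : List (List (String × Int))), Dom_get_unique_aa focal_composition other_compositions → Spec_get_unique_aa focal_composition other_compositions (get_unique_aa focal_composition other_compositions)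

-- ===== LEMMAS AND PROOFS =====

-- membership in the union set A folds up over the other compositions
theorem mem_foldl_update (others : List (List (String × Int))) (s : PySem.Set String) (y : String) :
    (y ∈ others.foldl (fun s comp => PySem.Set.update s (comp.map Prod.fst)) s) ↔
      y ∈ s ∨ ∃ comp ∈ others, y ∈ comp.map Prod.fst := by
  induction others generalizing s with
  | nil => simp
  | cons c cs ih =>
    simp [List.foldl_cons, ih, PySem.Set.mem_update]
    tauto

-- the two lists handed to sorted have the same members
theorem mem_lists (focal : List (String × Int)) (others : List (List (String × Int))) (y : String) :
    (y ∈ PySem.Set.diff (PySem.Set.ofList (focal.map Prod.fst))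
          (others.foldl (fun s comp => PySem.Set.update s (comp.map Prod.fst)) PySem.Set.empty)) ↔
      y ∈ (PySem.List.dedup (focal.map Prod.fst)).filter
          (fun aa => others.all (fun comp => !(comp.map Prod.fst).contains aa)) := by
  simp [PySem.Set.mem_diff, PySem.Set.mem_ofList, mem_foldl_update, List.mem_filter, List.all_eq_true, PySem.Set.empty]


theorem lists_perm (focal : List (String × Int)) (others : List (List (String × Int))) :
    ((PySem.List.dedup (focal.map Prod.fst)).filter
        (fun aa => others.all (fun comp => !(comp.map Prod.fst).contains aa))).Perm
      (PySem.Set.diff (PySem.Set.ofList (focal.map Prod.fst))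
        (others.foldl (fun s comp => PySem.Set.update s (comp.map Prod.fst)) PySem.Set.empty)) := by
  refine (List.perm_ext_iff_of_nodup ?_ ?_).mpr ?_
  · exact List.Nodup.filter _ (by rw [PySem.List.dedup_eq_ofList]; exact PySem.Set.nodup_ofList _)
  · exact PySem.Set.nodup_diff _ _ (PySem.Set.nodup_ofList _)
  · intro y; exact (mem_lists focal others y).symm

-- ===== VERDICT (by name: the statement is the Claim_ definition above) =====
theorem get_unique_aa_spec : Claim_equal_get_unique_aa := by
  intro focal others _
  unfold Spec_get_unique_aa get_unique_aa get_unique_aa_alt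
  by_cases h : focal = []
  · subst h
    simp [PySem.List.dedup, PySem.List.sorted, PySem.Str.join]
  · simp only [if_neg h]
    congr 1
    exact PySem.List.sorted_eq_sorted_of_perm _ _ (fun x => x)
      (fun a b hab => hab) (lists_perm focal others).symm
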